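-- pv_equiv track=rewrite | github.com/HenryAnkers/AdventOfCode | 2024/day03.py | processMul
-- ===== SOURCE A (Python) =====
-- def processMul(line, i):
--     num1 = ""
--     foundComma = False
--     while not foundComma and i < len(line):
--         if line[i] == ",":
--             i += 1
--             break
--         elif not str.isdigit(line[i]):
--             return 0
--         else:
--             num1 += line[i]
--         i += 1
--
--     num2 = ""
--     foundEnd = False
--     while not foundEnd and i < len(line):
--         if line[i] == ")":
--             break
--         elif not str.isdigit(line[i]):
--             return 0
--         else:
--             num2 += line[i]
--         i += 1
--
--     if num1 == "" or num2 == "":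
--         return 0
--
--     return int(num1) * int(num2)
-- ===== SOURCE B (Python) =====
-- def processMul(line, i):
--     comma = line.find(',', i)
--     if comma == -1:
--         return 0
--     num1 = line[i:comma]
--     rest = line[comma + 1:]
--     close = rest.find(')')
--     num2 = rest if close == -1 else rest[:close]
--     if not num1.isdigit() or not num2.isdigit():
--         return 0
--     return int(num1) * int(num2)
-- ===== Notes on version B (the rewrite author's own statement) =====
-- stated objective: simpler
-- what changed: Replaces A's two char-by-char accumulation while-loops with find-the-comma / find-the-paren plus slicing, validating the two substrings with .isdigit() before multiplying.
-- outside the precondition, e.g. on processMul('1,2', -3): A returns 0, B returns 2; on processMul('', -1): A raises IndexError, B returns 0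
import Mathlib
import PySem

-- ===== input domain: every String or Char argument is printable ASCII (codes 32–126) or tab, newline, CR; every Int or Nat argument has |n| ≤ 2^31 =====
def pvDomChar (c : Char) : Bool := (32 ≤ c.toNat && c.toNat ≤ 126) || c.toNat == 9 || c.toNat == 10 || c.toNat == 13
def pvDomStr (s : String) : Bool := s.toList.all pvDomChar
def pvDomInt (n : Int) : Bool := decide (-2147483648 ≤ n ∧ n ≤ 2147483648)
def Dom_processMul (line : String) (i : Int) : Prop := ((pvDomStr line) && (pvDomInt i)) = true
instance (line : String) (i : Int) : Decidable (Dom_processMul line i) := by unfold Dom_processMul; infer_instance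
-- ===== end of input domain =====

-- B replaces A's two char-by-char accumulation loops by find + slice + isdigit validation (objective: simpler); return value only, no mutation.

-- ===== PORT A =====
-- first while loop of A: accumulate digits into num1 until ',' (advance past it) or end of string;
-- a non-digit, non-comma character means `return 0`, modelled as `none`.
-- pyGet? = none is Python's IndexError (only reachable for i < -len, outside Pre_); the port takes the none branch there.
def pmScan1 (s : List Char) (i : Int) (num1 : List Char) : Option (List Char × Int) :=
  if _h : i < (s.length : Int) then
    match PySem.List.pyGet? s i with
    | none => none
    | some c =>
      if c = ',' then some (num1, i + 1)
      else if PySem.Chars.strIsdigit [c] = false then none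
      else pmScan1 s (i + 1) (num1 ++ [c])
  else some (num1, i)
termination_by ((s.length : Int) - i).toNat
decreasing_by omega

-- second while loop of A: accumulate digits into num2 until ')' or end of string; non-digit means `return 0` (none).
def pmScan2 (s : List Char) (i : Int) (num2 : List Char) : Option (List Char) :=
  if _h : i < (s.length : Int) then
    match PySem.List.pyGet? s i with
    | none => none
    | some c =>
      if c = ')' then some num2
      else if PySem.Chars.strIsdigit [c] = false then none
      else pmScan2 s (i + 1) (num2 ++ [c])
  else some num2
termination_by ((s.length : Int) - i).toNat
decreasing_by omega

def processMul (line : String) (i : Int) : Int :=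
  match pmScan1 line.toList i [] with
  | none => 0
  | some (num1, i2) =>
    match pmScan2 line.toList i2 [] with
    | none => 0
    | some num2 =>
      if num1 = [] ∨ num2 = [] then 0
      else ((PySem.Int.ofChars? num1).getD 0) * ((PySem.Int.ofChars? num2).getD 0)

-- ===== PORT B =====
-- comma = line.find(',', i); num1 = line[i:comma]; rest = line[comma+1:]; close = rest.find(')');
-- num2 = rest (or rest[:close]); validate both with .isdigit(), then multiply.
def processMul_alt (line : String) (i : Int) : Int :=
  let t := line.toList
  let comma := PySem.Chars.findFrom t [','] i none
  if comma = -1 then 0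
  else
    let num1 := PySem.Chars.slice t (some i) (some comma)
    let rest := PySem.Chars.slice t (some (comma + 1)) none
    let close := PySem.Chars.find rest [')']
    let num2 := if close = -1 then rest else PySem.Chars.slice rest none (some close)
    if PySem.Chars.strIsdigit num1 = false || PySem.Chars.strIsdigit num2 = false then 0
    else ((PySem.Int.ofChars? num1).getD 0) * ((PySem.Int.ofChars? num2).getD 0)

-- ===== PRECONDITION & SPEC =====
-- Pre_ excludes negative i: for i < -len(line) A raises IndexError, and for -len ≤ i < 0 A's value comes
-- from negative-index wraparound (the scan runs off the end of the string and restarts at position 0),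
-- an unspecified corner where A's and B's values are both defensible.
def Pre_processMul (line : String) (i : Int) : Prop := 0 ≤ i
instance (line : String) (i : Int) : Decidable (Pre_processMul line i) := by unfold Pre_processMul; infer_instance
def pvWitness_processMul : String × Int := ("12,34)", 0)

def Spec_processMul (line : String) (i : Int) (out : Int) : Prop := out = processMul_alt line i
instance (line : String) (i : Int) (out : Int) : Decidable (Spec_processMul line i out) := by unfold Spec_processMul; infer_instance

-- ===== CLAIM (what is proved, stated in full; the proofs are below) =====
def Claim_equal_processMul : Prop := ∀ (line : String) (i : Int), Dom_processMul line i → Pre_processMul line i → Spec_processMul line i (processMul line i)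

-- ===== LEMMAS AND PROOFS =====

-- reference versions of A's two loops, as structural recursion over the characters still to scan
def pmF1 : List Char → Option (List Char × Option (List Char))
  | [] => some ([], none)
  | c :: cs =>
    if c = ',' then some ([], some cs)
    else if PySem.Chars.isdigit c = false then none
    else match pmF1 cs with
      | none => none
      | some (n, r) => some (c :: n, r)

def pmF2 : List Char → Option (List Char)
  | [] => some []
  | c :: cs =>
    if c = ')' then some []
    else if PySem.Chars.isdigit c = false then none
    else (pmF2 cs).map (c :: ·)

def pmRef (t : List Char) : Int :=
  match pmF1 t with
  | none => 0
  | some (_, none) => 0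
  | some (n, some r) =>
    match pmF2 r with
    | none => 0
    | some m =>
      if n = [] ∨ m = [] then 0
      else ((PySem.Int.ofChars? n).getD 0) * ((PySem.Int.ofChars? m).getD 0)

theorem pm_isd (c : Char) : PySem.Chars.strIsdigit [c] = PySem.Chars.isdigit c := by
  simp [PySem.Chars.strIsdigit]

theorem pm_drop_cons {s : List Char} {i : Int} {c : Char} (h0 : 0 ≤ i)
    (hget : PySem.List.pyGet? s i = some c) :
    s.drop i.toNat = c :: s.drop (i.toNat + 1) := by
  rw [PySem.List.pyGet?_of_nonneg _ h0] at hget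
  have hlt : i.toNat < s.length := by
    by_contra h
    simp [List.getElem?_eq_none (by omega : s.length ≤ i.toNat)] at hget
  have hc : s[i.toNat] = c := by simpa [List.getElem?_eq_getElem hlt] using hget
  rw [List.drop_eq_getElem_cons hlt, hc]

theorem pmScan1_spec (s : List Char) (i : Int) (acc : List Char) (h0 : 0 ≤ i) :
    (pmF1 (s.drop i.toNat) = none → pmScan1 s i acc = none) ∧
    (∀ n, pmF1 (s.drop i.toNat) = some (n, none) →
      ∃ j : Int, pmScan1 s i acc = some (acc ++ n, j) ∧ (s.length : Int) ≤ j) ∧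
    (∀ n r, pmF1 (s.drop i.toNat) = some (n, some r) →
      ∃ j : Int, pmScan1 s i acc = some (acc ++ n, j) ∧ 0 ≤ j ∧ s.drop j.toNat = r) := by
  revert h0
  induction i, acc using pmScan1.induct (s := s) with
  | case1 i acc hlt hget =>
    intro h0
    rw [PySem.List.pyGet?_of_nonneg _ h0] at hget
    simp [List.getElem?_eq_getElem (show i.toNat < s.length by omega)] at hget
  | case2 i acc hlt hget =>
    intro h0
    rw [pm_drop_cons h0 hget]
    refine ⟨by simp [pmF1], by simp [pmF1], ?_⟩
    intro n r h
    simp [pmF1] at h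
    obtain ⟨rfl, rfl⟩ := h
    refine ⟨i + 1, ?_, by omega, by rw [show (i + 1).toNat = i.toNat + 1 by omega]⟩
    rw [pmScan1]; simp [hlt, hget]
  | case3 i acc hlt c hget hc hd =>
    intro h0
    rw [pm_drop_cons h0 hget]
    have hd' : PySem.Chars.isdigit c = false := by rw [← pm_isd]; exact hd
    rw [pmScan1]
    simp [hlt, hget, hc, hd, hd', pmF1]
  | case4 i acc hlt c hget hc hd ih =>
    intro h0
    rw [pm_drop_cons h0 hget]
    have hd' : ¬ PySem.Chars.isdigit c = false := by rw [← pm_isd]; exact hd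
    have ih' := ih (by omega)
    rw [show (i + 1).toNat = i.toNat + 1 by omega] at ih'
    have hstep : pmScan1 s i acc = pmScan1 s (i + 1) (acc ++ [c]) := by
      rw [pmScan1]; simp [hlt, hget, hc, hd]
    rcases hrec : pmF1 (s.drop (i.toNat + 1)) with _ | ⟨n, r⟩
    · refine ⟨?_, by simp [pmF1, if_neg hc, hrec], by simp [pmF1, if_neg hc, hrec]⟩
      intro _
      rw [hstep]; exact ih'.1 hrec
    · refine ⟨by simp [pmF1, if_neg hc, if_neg hd', hrec], ?_, ?_⟩
      · intro n' h
        simp only [pmF1, if_neg hc, if_neg hd', hrec, Option.some.injEq, Prod.mk.injEq] at h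
        obtain ⟨hn, hr⟩ := h
        obtain ⟨j, hj1, hj2⟩ := ih'.2.1 n (by rw [hrec, hr])
        refine ⟨j, ?_, hj2⟩
        rw [hstep, hj1, ← hn]
        simp
      · intro n' r' h
        simp only [pmF1, if_neg hc, if_neg hd', hrec, Option.some.injEq, Prod.mk.injEq] at h
        obtain ⟨hn, hr⟩ := h
        obtain ⟨j, hj1, hj2, hj3⟩ := ih'.2.2 n r' (by rw [hrec, hr])
        refine ⟨j, ?_, hj2, hj3⟩
        rw [hstep, hj1, ← hn]
        simp
  | case5 i acc hlt =>
    intro h0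
    have hnil : s.drop i.toNat = [] := List.drop_eq_nil_of_le (by omega)
    rw [hnil, pmScan1]
    refine ⟨by simp [pmF1], ?_, by simp [pmF1]⟩
    intro n h
    simp only [pmF1, Option.some.injEq, Prod.mk.injEq] at h
    exact ⟨i, by simp [hlt, ← h.1], by omega⟩

theorem pmScan2_spec (s : List Char) (i : Int) (acc : List Char) (h0 : 0 ≤ i) :
    (pmF2 (s.drop i.toNat) = none → pmScan2 s i acc = none) ∧
    (∀ n, pmF2 (s.drop i.toNat) = some n → pmScan2 s i acc = some (acc ++ n)) := by
  revert h0
  induction i, acc using pmScan2.induct (s := s) with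
  | case1 i acc hlt hget =>
    intro h0
    rw [PySem.List.pyGet?_of_nonneg _ h0] at hget
    simp [List.getElem?_eq_getElem (show i.toNat < s.length by omega)] at hget
  | case2 i acc hlt hget =>
    intro h0
    rw [pm_drop_cons h0 hget]
    rw [pmScan2]
    simp [hlt, hget, pmF2]
  | case3 i acc hlt c hget hc hd =>
    intro h0
    rw [pm_drop_cons h0 hget, pmScan2]
    have hd' : PySem.Chars.isdigit c = false := by rw [← pm_isd]; exact hd
    simp [hlt, hget, hc, hd, hd', pmF2]
  | case4 i acc hlt c hget hc hd ih =>
    intro h0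
    rw [pm_drop_cons h0 hget]
    have hd' : ¬ PySem.Chars.isdigit c = false := by rw [← pm_isd]; exact hd
    have ih' := ih (by omega)
    have hnat : (i + 1).toNat = i.toNat + 1 := by omega
    rw [hnat] at ih'
    have hstep : pmScan2 s i acc = pmScan2 s (i + 1) (acc ++ [c]) := by
      rw [pmScan2]; simp [hlt, hget, hc, hd]
    constructor
    · intro hnone
      simp only [pmF2, if_neg hc, if_neg hd', Option.map_eq_none_iff] at hnone
      rw [hstep]; exact ih'.1 hnone
    · intro n hsome
      simp only [pmF2, if_neg hc, if_neg hd', Option.map_eq_some_iff] at hsome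
      obtain ⟨m, hm, rfl⟩ := hsome
      rw [hstep, ih'.2 m hm]
      simp
  | case5 i acc hlt =>
    intro h0
    have hnil : s.drop i.toNat = [] := List.drop_eq_nil_of_le (by omega)
    rw [hnil, pmScan2]
    simp [hlt, pmF2]

theorem pmA_eq_ref (line : String) (i : Int) (h0 : 0 ≤ i) :
    processMul line i = pmRef (line.toList.drop i.toNat) := by
  unfold processMul pmRef
  rcases h1 : pmF1 (line.toList.drop i.toNat) with _ | ⟨n, r⟩
  · rw [(pmScan1_spec line.toList i [] h0).1 h1]
  · rcases r with _ | r
    · obtain ⟨j, hj1, hj2⟩ := (pmScan1_spec line.toList i [] h0).2.1 n h1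
      have h2 := (pmScan2_spec line.toList j [] (by omega)).2 []
        (by rw [List.drop_eq_nil_of_le (by omega)]; rfl)
      simp only [List.nil_append] at hj1 h2
      simp [hj1, h2]
    · obtain ⟨j, hj1, hj2, hj3⟩ := (pmScan1_spec line.toList i [] h0).2.2 n r h1
      simp only [List.nil_append] at hj1
      rcases h2 : pmF2 r with _ | m
      · have h3 := (pmScan2_spec line.toList j [] hj2).1 (by rw [hj3, h2])
        simp [hj1, h3, h2]
      · have h3 := (pmScan2_spec line.toList j [] hj2).2 m (by rw [hj3, h2])
        simp only [List.nil_append] at h3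
        simp [hj1, h3, h2]

theorem pm_findFrom (s sub : List Char) (i : Int) (h0 : 0 ≤ i) :
    PySem.Chars.findFrom s sub i none =
      if (s.length : Int) < i then -1
      else if PySem.Chars.find (s.drop i.toNat) sub = -1 then -1
      else i + PySem.Chars.find (s.drop i.toNat) sub := by
  simp only [PySem.Chars.findFrom]
  rw [if_neg (by omega : ¬ i < 0)]
  by_cases hb : (s.length : Int) < i
  · rw [if_pos hb, if_pos hb]
  · rw [if_neg (by omega : ¬ (s.length:Int) < i), if_neg hb]
    rw [show ((s.length : Int)).toNat = s.length by omega, List.take_length]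
theorem pm_single_prefix (c : Char) (l : List Char) : [c] <+: l ↔ l.head? = some c := by
  cases l with
  | nil => simp
  | cons a t => simp [List.cons_prefix_cons, eq_comm]
theorem pm_mem_take {c : Char} {l : List Char} {n : Nat} (h : c ∈ l.take n) :
    ∃ j, j < n ∧ l[j]? = some c := by
  rw [List.mem_take_iff_getElem] at h
  obtain ⟨j, hj, hc⟩ := h
  exact ⟨j, by omega, by rw [List.getElem?_eq_getElem (by omega)]; exact congrArg some hc⟩
theorem pm_find_decomp (t : List Char) (c : Char) (h : 0 ≤ PySem.Chars.find t [c]) :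
    t.drop (PySem.Chars.find t [c]).toNat = c :: t.drop ((PySem.Chars.find t [c]).toNat + 1) ∧
    c ∉ t.take (PySem.Chars.find t [c]).toNat := by
  obtain ⟨hpre, hmin⟩ := PySem.Chars.find_spec h
  rw [pm_single_prefix, List.head?_drop] at hpre
  constructor
  · have hlt : (PySem.Chars.find t [c]).toNat < t.length := by
      by_contra hge
      rw [List.getElem?_eq_none (by omega)] at hpre
      simp at hpre
    rw [List.drop_eq_getElem_cons hlt]
    rw [List.getElem?_eq_getElem hlt] at hpre
    simpa using congrArg (fun o => o.getD c :: t.drop ((PySem.Chars.find t [c]).toNat + 1)) hpre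
  · intro hmem
    obtain ⟨j, hj, hcj⟩ := pm_mem_take hmem
    exact hmin j hj (by rw [pm_single_prefix, List.head?_drop]; exact hcj)
theorem pm_not_mem_of_find_neg (t : List Char) (c : Char)
    (h : PySem.Chars.find t [c] = -1) : c ∉ t := by
  rw [PySem.Chars.find_eq_neg_one_iff] at h
  intro hm
  exact h ((List.singleton_infix_iff c t).mpr hm)

theorem pm_f1_nocomma (t : List Char) (h : ',' ∉ t) :
    pmF1 t = if t.all PySem.Chars.isdigit then some (t, none) else none := by
  induction t with
  | nil => simp [pmF1]
  | cons c cs ih =>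
    have hc : ¬ c = ',' := by intro h'; exact h (h' ▸ List.mem_cons_self)
    rcases hd : PySem.Chars.isdigit c with _ | _
    · simp [pmF1, hc, hd]
    · rw [show pmF1 (c :: cs) = (match pmF1 cs with
        | none => none | some (n, r) => some (c :: n, r)) by simp [pmF1, hc, hd]]
      rw [ih (fun hm => h (List.mem_cons_of_mem _ hm))]
      by_cases hall : cs.all PySem.Chars.isdigit <;> simp [hall, hd]

theorem pm_f1_comma (p q : List Char) (h : ',' ∉ p) :
    pmF1 (p ++ ',' :: q) = if p.all PySem.Chars.isdigit then some (p, some q) else none := by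
  induction p with
  | nil => simp [pmF1]
  | cons c cs ih =>
    have hc : ¬ c = ',' := by intro h'; exact h (h' ▸ List.mem_cons_self)
    rcases hd : PySem.Chars.isdigit c with _ | _
    · simp [pmF1, hc, hd]
    · rw [show pmF1 (c :: cs ++ ',' :: q) = (match pmF1 (cs ++ ',' :: q) with
        | none => none | some (n, r) => some (c :: n, r)) by simp [pmF1, hc, hd]]
      rw [ih (fun hm => h (List.mem_cons_of_mem _ hm))]
      by_cases hall : cs.all PySem.Chars.isdigit <;> simp [hall, hd]

theorem pm_f2_noclose (t : List Char) (h : ')' ∉ t) :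
    pmF2 t = if t.all PySem.Chars.isdigit then some t else none := by
  induction t with
  | nil => simp [pmF2]
  | cons c cs ih =>
    have hc : ¬ c = ')' := by intro h'; exact h (h' ▸ List.mem_cons_self)
    rcases hd : PySem.Chars.isdigit c with _ | _
    · simp [pmF2, hc, hd]
    · rw [show pmF2 (c :: cs) = (pmF2 cs).map (c :: ·) by simp [pmF2, hc, hd]]
      rw [ih (fun hm => h (List.mem_cons_of_mem _ hm))]
      by_cases hall : cs.all PySem.Chars.isdigit <;> simp [hall, hd]

theorem pm_f2_close (u v : List Char) (h : ')' ∉ u) :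
    pmF2 (u ++ ')' :: v) = if u.all PySem.Chars.isdigit then some u else none := by
  induction u with
  | nil => simp [pmF2]
  | cons c cs ih =>
    have hc : ¬ c = ')' := by intro h'; exact h (h' ▸ List.mem_cons_self)
    rcases hd : PySem.Chars.isdigit c with _ | _
    · simp [pmF2, hc, hd]
    · rw [show pmF2 (c :: cs ++ ')' :: v) = (pmF2 (cs ++ ')' :: v)).map (c :: ·) by simp [pmF2, hc, hd]]
      rw [ih (fun hm => h (List.mem_cons_of_mem _ hm))]
      by_cases hall : cs.all PySem.Chars.isdigit <;> simp [hall, hd]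

theorem pm_ref_nocomma (t : List Char) (h : ',' ∉ t) : pmRef t = 0 := by
  unfold pmRef
  rw [pm_f1_nocomma t h]
  split_ifs <;> simp

theorem pm_ref_comma (p q : List Char) (h : ',' ∉ p) (hall : p.all PySem.Chars.isdigit = true) :
    pmRef (p ++ ',' :: q) =
      (match pmF2 q with
       | none => (0 : Int)
       | some m =>
         if p = [] ∨ m = [] then 0
         else ((PySem.Int.ofChars? p).getD 0) * ((PySem.Int.ofChars? m).getD 0)) := by
  unfold pmRef
  rw [pm_f1_comma p q h, if_pos hall]

theorem pm_ref_comma_bad (p q : List Char) (h : ',' ∉ p)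
    (hall : ¬ p.all PySem.Chars.isdigit = true) : pmRef (p ++ ',' :: q) = 0 := by
  unfold pmRef
  rw [pm_f1_comma p q h, if_neg hall]

-- the final comparison of B's validate-and-multiply with pmRef's branch, all-digit prefix case
theorem pm_tail_eq (p w X : List Char) (hall : p.all PySem.Chars.isdigit = true)
    (hw : pmF2 X = if w.all PySem.Chars.isdigit then some w else none) :
    (if PySem.Chars.strIsdigit p = false || PySem.Chars.strIsdigit w = false then 0
     else ((PySem.Int.ofChars? p).getD 0) * ((PySem.Int.ofChars? w).getD 0)) =
    (match pmF2 X with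
     | none => (0 : Int)
     | some m =>
       if p = [] ∨ m = [] then 0
       else ((PySem.Int.ofChars? p).getD 0) * ((PySem.Int.ofChars? m).getD 0)) := by
  rw [hw]
  by_cases hq : w.all PySem.Chars.isdigit
  · rw [if_pos hq]
    by_cases hp : p = [] <;> by_cases hw0 : w = [] <;>
      simp [PySem.Chars.strIsdigit, hp, hw0, hall, hq]
  · rw [if_neg hq]
    simp [PySem.Chars.strIsdigit, hq]

theorem pmB_eq_ref (line : String) (i : Int) (h0 : 0 ≤ i) :
    processMul_alt line i = pmRef (line.toList.drop i.toNat) := by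
  simp only [processMul_alt]
  rw [pm_findFrom _ _ _ h0]
  by_cases hbig : ((line.toList.length : Int)) < i
  · rw [if_pos hbig]
    rw [List.drop_eq_nil_of_le (by omega : line.toList.length ≤ i.toNat)]
    simp [pmRef, pmF1]
  · rw [if_neg hbig]
    by_cases hf : PySem.Chars.find (line.toList.drop i.toNat) [','] = -1
    · rw [if_pos hf]
      simp [pm_ref_nocomma _ (pm_not_mem_of_find_neg _ _ hf)]
    · rw [if_neg hf]
      have hfd : 0 ≤ PySem.Chars.find (line.toList.drop i.toNat) [','] := by
        have := PySem.Chars.neg_one_le_find (line.toList.drop i.toNat) [',']; omega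
      have hflen := PySem.Chars.find_le_length (line.toList.drop i.toNat) [',']
      rw [List.length_drop] at hflen
      obtain ⟨hdropt, hnp⟩ := pm_find_decomp (line.toList.drop i.toNat) ',' hfd
      set fd := PySem.Chars.find (line.toList.drop i.toNat) [','] with hfddef
      set t := line.toList.drop i.toNat with htdef
      set k := fd.toNat with hkdef
      set p := t.take k with hpdef
      set q := t.drop (k + 1) with hqdef
      rw [if_neg (by omega : ¬ i + fd = -1)]
      have hnum1 : PySem.Chars.slice line.toList (some i) (some (i + fd)) = p := by
        simp only [PySem.Chars.slice_eq_listSlice]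
        rw [PySem.List.slice_of_nonneg line.toList h0 (by omega) (by omega) (by omega)]
        rw [hpdef, htdef, show (i + fd).toNat - i.toNat = k by omega]
      have hrest : PySem.Chars.slice line.toList (some (i + fd + 1)) none = q := by
        simp only [PySem.Chars.slice_eq_listSlice]
        rw [PySem.List.slice_from line.toList (by omega)]
        rw [hqdef, htdef, List.drop_drop, show i.toNat + (k + 1) = (i + fd + 1).toNat by omega]
      rw [hnum1, hrest]
      have hteq : t = p ++ ',' :: q := by
        rw [hpdef, hqdef, ← hdropt, List.take_append_drop]
      rw [hteq]
      by_cases hall : p.all PySem.Chars.isdigit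
      · rw [pm_ref_comma p q hnp hall]
        by_cases hc2 : PySem.Chars.find q [')'] = -1
        · rw [if_pos hc2]
          exact pm_tail_eq p q q hall (pm_f2_noclose q (pm_not_mem_of_find_neg _ _ hc2))
        · rw [if_neg hc2]
          have hcd : 0 ≤ PySem.Chars.find q [')'] := by
            have := PySem.Chars.neg_one_le_find q [')']; omega
          obtain ⟨hdq, hnu⟩ := pm_find_decomp q ')' hcd
          have hnum2 : PySem.Chars.slice q none (some (PySem.Chars.find q [')'])) =
              q.take (PySem.Chars.find q [')']).toNat := by
            simp only [PySem.Chars.slice_eq_listSlice]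
            exact PySem.List.slice_to q hcd
          rw [hnum2]
          have hqe : q = q.take (PySem.Chars.find q [')']).toNat ++
              ')' :: q.drop ((PySem.Chars.find q [')']).toNat + 1) := by
            rw [← hdq, List.take_append_drop]
          have hw := pm_f2_close (q.take (PySem.Chars.find q [')']).toNat)
            (q.drop ((PySem.Chars.find q [')']).toNat + 1)) hnu
          rw [← hqe] at hw
          exact pm_tail_eq p _ q hall hw
      · rw [pm_ref_comma_bad p q hnp hall]
        have hpd : PySem.Chars.strIsdigit p = false := by
          simp [PySem.Chars.strIsdigit, hall]
        simp [hpd]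

-- ===== VERDICT (by name: the statement is the Claim_ definition above) =====
theorem processMul_spec : Claim_equal_processMul := by
  intro line i _ hpre
  unfold Spec_processMul
  rw [pmA_eq_ref line i hpre, pmB_eq_ref line i hpre]
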